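-- pv_equiv track=rewrite | github.com/mbello/aio-odoorpc-base | aio_odoorpc_base/helpers.py | odoo_base_url2jsonrpc_endpoint
-- ===== SOURCE A (Python) =====
-- from typing import List, Mapping, Optional, Union
--
-- def odoo_base_url2jsonrpc_endpoint(odoo_base_url: str = '',
--                                    custom_odoo_jsonrpc_suffix: Optional[str] = None) -> str:
--
--     suffix = 'jsonrpc' if custom_odoo_jsonrpc_suffix is None else custom_odoo_jsonrpc_suffix
--
--     if suffix.startswith('/'):
--         return odoo_base_url2jsonrpc_endpoint(odoo_base_url=odoo_base_url,
--                                               custom_odoo_jsonrpc_suffix=suffix[1:])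
--     if suffix.endswith('/'):
--         return odoo_base_url2jsonrpc_endpoint(odoo_base_url=odoo_base_url,
--                                               custom_odoo_jsonrpc_suffix=suffix[:-1])
--     if odoo_base_url and odoo_base_url.endswith('/'):
--         return odoo_base_url2jsonrpc_endpoint(odoo_base_url=odoo_base_url[:-1],
--                                               custom_odoo_jsonrpc_suffix=custom_odoo_jsonrpc_suffix)
--
--     if not odoo_base_url:
--         return suffix
--     elif odoo_base_url.endswith(suffix):
--         return odoo_base_url
--     else:
--         return f'{odoo_base_url}/{suffix}'
-- ===== SOURCE B (Python) =====
-- def odoo_base_url2jsonrpc_endpoint(odoo_base_url: str = '',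
--                                    custom_odoo_jsonrpc_suffix=None) -> str:
--     suffix = ('jsonrpc' if custom_odoo_jsonrpc_suffix is None else custom_odoo_jsonrpc_suffix).strip('/')
--     base = odoo_base_url.rstrip('/')
--     if not base:
--         return suffix
--     if base.endswith(suffix):
--         return base
--     return f'{base}/{suffix}'
-- ===== Notes on version B (the rewrite author's own statement) =====
-- stated objective: simpler
-- what changed: Replaces A's character-by-character slash-stripping recursion with direct built-in strip/rstrip of slashes plus one three-way decision.
import Mathlib
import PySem

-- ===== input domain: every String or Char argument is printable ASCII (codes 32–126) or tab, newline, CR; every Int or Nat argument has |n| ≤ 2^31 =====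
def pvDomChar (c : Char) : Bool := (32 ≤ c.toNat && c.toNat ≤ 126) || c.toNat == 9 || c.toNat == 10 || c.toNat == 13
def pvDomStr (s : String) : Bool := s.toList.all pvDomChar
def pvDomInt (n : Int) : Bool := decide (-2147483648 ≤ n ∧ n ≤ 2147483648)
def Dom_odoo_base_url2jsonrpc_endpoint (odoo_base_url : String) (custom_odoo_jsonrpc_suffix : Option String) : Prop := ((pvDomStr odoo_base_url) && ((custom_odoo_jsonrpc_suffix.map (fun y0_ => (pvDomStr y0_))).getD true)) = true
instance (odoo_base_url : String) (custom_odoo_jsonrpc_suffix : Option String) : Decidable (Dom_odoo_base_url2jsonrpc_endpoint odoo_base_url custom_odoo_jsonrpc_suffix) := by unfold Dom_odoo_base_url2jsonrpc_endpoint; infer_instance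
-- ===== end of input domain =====

-- B replaces A's slash-stripping recursion with direct built-in strip/rstrip of slashes plus one three-way decision (objective: simpler).

-- ===== PORT A =====
-- A's recursion, transliterated on List Char (strings pass through .toList / String.ofList)
def pvA (base : List Char) (custom : Option (List Char)) : List Char :=
  let suffix := custom.getD "jsonrpc".toList     -- 'jsonrpc' if custom is None else custom
  if PySem.Chars.startswith suffix ['/'] then
    pvA base (some (PySem.Chars.slice suffix (some 1) none))
  else if PySem.Chars.endswith suffix ['/'] then
    pvA base (some (PySem.Chars.slice suffix none (some (-1))))
  else if !base.isEmpty && PySem.Chars.endswith base ['/'] then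
    pvA (PySem.Chars.slice base none (some (-1))) custom
  else if base.isEmpty then suffix
  else if PySem.Chars.endswith base suffix then base
  else base ++ '/' :: suffix   -- f'{odoo_base_url}/{suffix}'
termination_by base.length + (custom.getD "jsonrpc".toList).length
decreasing_by
  · rename_i h
    rw [PySem.Chars.startswith_iff] at h
    obtain ⟨t, ht⟩ := h
    have e1 : PySem.Chars.slice suffix (some 1) none = suffix.tail := by
      simp [PySem.Chars.slice_eq_listSlice, PySem.List.slice_from_one]
    have e2 : custom.getD "jsonrpc".toList = suffix := rfl
    simp only [Option.getD_some, e1, e2]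
    rw [← ht]
    simp
  · rename_i h2
    rw [PySem.Chars.endswith_iff] at h2
    obtain ⟨u, hu⟩ := h2
    have e1 : PySem.Chars.slice suffix none (some (-1)) = suffix.dropLast := by
      simp [PySem.Chars.slice_eq_listSlice, PySem.List.slice_to_neg_one]
    have e2 : custom.getD "jsonrpc".toList = suffix := rfl
    have hne : suffix ≠ [] := by
      intro hn; rw [hn] at hu; simpa using congrArg List.length hu
    have hd := (List.length_dropLast (xs := suffix))
    have hp : 0 < suffix.length := List.length_pos_iff.mpr hne
    simp only [Option.getD_some, e1, e2]
    omega
  · rename_i h3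
    have e1 : PySem.Chars.slice base none (some (-1)) = base.dropLast := by
      simp [PySem.Chars.slice_eq_listSlice, PySem.List.slice_to_neg_one]
    have hne : base ≠ [] := by
      intro hn; rw [hn] at h3; simp at h3
    have hd := (List.length_dropLast (xs := base))
    have hp : 0 < base.length := List.length_pos_iff.mpr hne
    simp only [e1]
    omega

def odoo_base_url2jsonrpc_endpoint (odoo_base_url : String) (custom_odoo_jsonrpc_suffix : Option String) : String :=
  String.ofList (pvA odoo_base_url.toList (custom_odoo_jsonrpc_suffix.map String.toList))

-- ===== PORT B =====
-- s.rstrip('/'): hand port (PySem has no chars-argument rstrip); exact for every string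
def pvRstripSlash (s : List Char) : List Char :=
  (s.reverse.dropWhile (fun c => c == '/')).reverse

def pvB (base : List Char) (custom : Option (List Char)) : List Char :=
  let suffix := PySem.Chars.stripChars (custom.getD "jsonrpc".toList) ['/']
  let b := pvRstripSlash base
  if b.isEmpty then suffix
  else if PySem.Chars.endswith b suffix then b
  else b ++ '/' :: suffix

def odoo_base_url2jsonrpc_endpoint_alt (odoo_base_url : String) (custom_odoo_jsonrpc_suffix : Option String) : String :=
  String.ofList (pvB odoo_base_url.toList (custom_odoo_jsonrpc_suffix.map String.toList))

-- ===== PRECONDITION & SPEC =====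
def Spec_odoo_base_url2jsonrpc_endpoint (odoo_base_url : String) (custom_odoo_jsonrpc_suffix : Option String) (out : String) : Prop := out = odoo_base_url2jsonrpc_endpoint_alt odoo_base_url custom_odoo_jsonrpc_suffix
instance (odoo_base_url : String) (custom_odoo_jsonrpc_suffix : Option String) (out : String) : Decidable (Spec_odoo_base_url2jsonrpc_endpoint odoo_base_url custom_odoo_jsonrpc_suffix out) := by unfold Spec_odoo_base_url2jsonrpc_endpoint; infer_instance

-- ===== CLAIM (what is proved, stated in full; the proofs are below) =====
def Claim_equal_odoo_base_url2jsonrpc_endpoint : Prop := ∀ (odoo_base_url : String) (custom_odoo_jsonrpc_suffix : Option String), Dom_odoo_base_url2jsonrpc_endpoint odoo_base_url custom_odoo_jsonrpc_suffix → Spec_odoo_base_url2jsonrpc_endpoint odoo_base_url custom_odoo_jsonrpc_suffix (odoo_base_url2jsonrpc_endpoint odoo_base_url custom_odoo_jsonrpc_suffix)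

-- ===== LEMMAS AND PROOFS =====

theorem pv_dw_of_not_prefix (s : List Char) (h : ¬ ['/'] <+: s) :
    s.dropWhile (fun c => decide (c = '/')) = s := by
  cases s with
  | nil => rfl
  | cons c t =>
    have hc : ¬ (c = '/') := by
      intro he; subst he; exact h (by simp)
    simp [List.dropWhile, hc]

theorem pv_strip_cons_slash (t : List Char) :
    PySem.Chars.stripChars ('/' :: t) ['/'] = PySem.Chars.stripChars t ['/'] := by
  simp [PySem.Chars.stripChars, List.dropWhile]

theorem pv_rstrip_append_slash (w : List Char) :
    pvRstripSlash (w ++ ['/']) = pvRstripSlash w := by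
  simp [pvRstripSlash]

theorem pv_strip_append_slash (u : List Char) (h : ¬ ['/'] <+: (u ++ ['/'])) :
    PySem.Chars.stripChars (u ++ ['/']) ['/'] = PySem.Chars.stripChars u ['/'] := by
  have hu : ¬ ['/'] <+: u := fun hp => h (hp.trans (List.prefix_append u ['/']))
  simp [PySem.Chars.stripChars, pv_dw_of_not_prefix u hu, pv_dw_of_not_prefix _ h]

theorem pv_strip_id (s : List Char) (h1 : ¬ ['/'] <+: s) (h2 : ¬ ['/'] <:+ s) :
    PySem.Chars.stripChars s ['/'] = s := by
  have hr : ¬ ['/'] <+: s.reverse := by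
    intro hp
    exact h2 (by simpa using List.reverse_prefix.mp (by simpa using hp))
  simp [PySem.Chars.stripChars, pv_dw_of_not_prefix s h1, pv_dw_of_not_prefix _ hr]

theorem pv_rstrip_id (s : List Char) (h : ¬ ['/'] <:+ s) :
    pvRstripSlash s = s := by
  have hr : ¬ ['/'] <+: s.reverse := by
    intro hp
    exact h (by simpa using List.reverse_prefix.mp (by simpa using hp))
  have h2 : s.reverse.dropWhile (fun c => c == '/') = s.reverse := by
    simpa using pv_dw_of_not_prefix s.reverse hr
  simp [pvRstripSlash, h2]

theorem pvA_eq_pvB (base : List Char) (custom : Option (List Char)) :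
    pvA base custom = pvB base custom := by
  induction base, custom using pvA.induct with
  | case1 base custom suffix h ih =>
    have hs : custom.getD "jsonrpc".toList = suffix := rfl
    obtain ⟨t, ht⟩ := (PySem.Chars.startswith_iff suffix ['/']).mp h
    have e1 : PySem.Chars.slice suffix (some 1) none = t := by
      rw [← ht]; simp [PySem.Chars.slice_eq_listSlice, PySem.List.slice_from_one]
    have e2 : PySem.Chars.stripChars (custom.getD "jsonrpc".toList) ['/'] =
        PySem.Chars.stripChars t ['/'] := by
      rw [hs, ← ht]; exact pv_strip_cons_slash t
    rw [pvA.eq_def]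
    simp only [hs, h, if_true, e1] at ih ⊢
    rw [ih]
    simp only [pvB, Option.getD_some, e2]
  | case2 base custom suffix h1 h2 ih =>
    have hs : custom.getD "jsonrpc".toList = suffix := rfl
    have hb1 : PySem.Chars.startswith suffix ['/'] = false := by
      cases hx : PySem.Chars.startswith suffix ['/']
      · rfl
      · exact absurd hx h1
    have hp1 : ¬ (['/'] <+: suffix) :=
      fun hx => h1 ((PySem.Chars.startswith_iff suffix ['/']).mpr hx)
    obtain ⟨u, hu⟩ := (PySem.Chars.endswith_iff suffix ['/']).mp h2
    have e1 : PySem.Chars.slice suffix none (some (-1)) = u := by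
      rw [← hu]; simp [PySem.Chars.slice_eq_listSlice, PySem.List.slice_to_neg_one]
    have e2 : PySem.Chars.stripChars (custom.getD "jsonrpc".toList) ['/'] =
        PySem.Chars.stripChars u ['/'] := by
      rw [hs, ← hu]; exact pv_strip_append_slash u (fun hp => hp1 (hu ▸ hp))
    rw [pvA.eq_def]
    simp only [hs, hb1, h2, Bool.false_eq_true, if_false, if_true, e1] at ih ⊢
    rw [ih]
    simp only [pvB, Option.getD_some, e2]
  | case3 base custom suffix h1 h2 h3 ih =>
    have hs : custom.getD "jsonrpc".toList = suffix := rfl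
    have hb1 : PySem.Chars.startswith suffix ['/'] = false := by
      cases hx : PySem.Chars.startswith suffix ['/']
      · rfl
      · exact absurd hx h1
    have hb2 : PySem.Chars.endswith suffix ['/'] = false := by
      cases hx : PySem.Chars.endswith suffix ['/']
      · rfl
      · exact absurd hx h2
    have hbe : PySem.Chars.endswith base ['/'] = true := (Bool.and_eq_true _ _ |>.mp h3).2
    obtain ⟨w, hw⟩ := (PySem.Chars.endswith_iff base ['/']).mp hbe
    have e1 : PySem.Chars.slice base none (some (-1)) = w := by
      rw [← hw]; simp [PySem.Chars.slice_eq_listSlice, PySem.List.slice_to_neg_one]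
    have e2 : pvRstripSlash base = pvRstripSlash w := by
      rw [← hw]; exact pv_rstrip_append_slash w
    rw [pvA.eq_def]
    simp only [hs, hb1, hb2, h3, Bool.false_eq_true, if_false, if_true, e1] at ih ⊢
    rw [ih]
    simp only [pvB, e2]
  | case4 base custom suffix h1 h2 h3 h4 =>
    have hs : custom.getD "jsonrpc".toList = suffix := rfl
    have hp1 : ¬ (['/'] <+: suffix) :=
      fun hx => h1 ((PySem.Chars.startswith_iff suffix ['/']).mpr hx)
    have hp2 : ¬ (['/'] <:+ suffix) :=
      fun hx => h2 ((PySem.Chars.endswith_iff suffix ['/']).mpr hx)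
    have hb1 : PySem.Chars.startswith suffix ['/'] = false := by
      cases hx : PySem.Chars.startswith suffix ['/']
      · rfl
      · exact absurd hx h1
    have hb2 : PySem.Chars.endswith suffix ['/'] = false := by
      cases hx : PySem.Chars.endswith suffix ['/']
      · rfl
      · exact absurd hx h2
    have hbase : base = [] := List.isEmpty_iff.mp h4
    subst hbase
    rw [pvA.eq_def]
    simp only [hs, hb1, hb2, Bool.false_eq_true, if_false, List.isEmpty_nil, if_true]
    simp only [pvB, hs]
    rw [pv_strip_id suffix hp1 hp2]
    simp [pvRstripSlash]
  | case5 base custom suffix h1 h2 h3 h4 h5 =>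
    have hs : custom.getD "jsonrpc".toList = suffix := rfl
    have hp1 : ¬ (['/'] <+: suffix) :=
      fun hx => h1 ((PySem.Chars.startswith_iff suffix ['/']).mpr hx)
    have hp2 : ¬ (['/'] <:+ suffix) :=
      fun hx => h2 ((PySem.Chars.endswith_iff suffix ['/']).mpr hx)
    have hb1 : PySem.Chars.startswith suffix ['/'] = false := by
      cases hx : PySem.Chars.startswith suffix ['/']
      · rfl
      · exact absurd hx h1
    have hb2 : PySem.Chars.endswith suffix ['/'] = false := by
      cases hx : PySem.Chars.endswith suffix ['/']
      · rfl
      · exact absurd hx h2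
    have hband : (!base.isEmpty && PySem.Chars.endswith base ['/']) = false := by
      cases hx : (!base.isEmpty && PySem.Chars.endswith base ['/'])
      · rfl
      · exact absurd hx h3
    have hb4 : base.isEmpty = false := by
      cases hx : base.isEmpty
      · rfl
      · exact absurd hx h4
    have he : PySem.Chars.endswith base ['/'] = false := by
      rw [hb4] at hband; simpa using hband
    have hnb : ¬ (['/'] <:+ base) := fun hx => by
      rw [(PySem.Chars.endswith_iff base ['/']).mpr hx] at he; exact Bool.true_eq_false.mp he
    have er : pvRstripSlash base = base := pv_rstrip_id base hnb
    rw [pvA.eq_def]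
    simp only [hs, hb1, hb2, he, Bool.and_false, Bool.false_eq_true, if_false, hb4, h5, if_true]
    simp only [pvB, hs]
    rw [pv_strip_id suffix hp1 hp2]
    simp only [er, hb4, Bool.false_eq_true, if_false, h5, if_true]
  | case6 base custom suffix h1 h2 h3 h4 h5 =>
    have hs : custom.getD "jsonrpc".toList = suffix := rfl
    have hp1 : ¬ (['/'] <+: suffix) :=
      fun hx => h1 ((PySem.Chars.startswith_iff suffix ['/']).mpr hx)
    have hp2 : ¬ (['/'] <:+ suffix) :=
      fun hx => h2 ((PySem.Chars.endswith_iff suffix ['/']).mpr hx)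
    have hb1 : PySem.Chars.startswith suffix ['/'] = false := by
      cases hx : PySem.Chars.startswith suffix ['/']
      · rfl
      · exact absurd hx h1
    have hb2 : PySem.Chars.endswith suffix ['/'] = false := by
      cases hx : PySem.Chars.endswith suffix ['/']
      · rfl
      · exact absurd hx h2
    have hband : (!base.isEmpty && PySem.Chars.endswith base ['/']) = false := by
      cases hx : (!base.isEmpty && PySem.Chars.endswith base ['/'])
      · rfl
      · exact absurd hx h3
    have hb4 : base.isEmpty = false := by
      cases hx : base.isEmpty
      · rfl
      · exact absurd hx h4
    have hb5 : PySem.Chars.endswith base suffix = false := by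
      cases hx : PySem.Chars.endswith base suffix
      · rfl
      · exact absurd hx h5
    have he : PySem.Chars.endswith base ['/'] = false := by
      rw [hb4] at hband; simpa using hband
    have hnb : ¬ (['/'] <:+ base) := fun hx => by
      rw [(PySem.Chars.endswith_iff base ['/']).mpr hx] at he; exact Bool.true_eq_false.mp he
    have er : pvRstripSlash base = base := pv_rstrip_id base hnb
    rw [pvA.eq_def]
    simp only [hs, hb1, hb2, he, Bool.and_false, hb4, hb5, Bool.false_eq_true, if_false]
    simp only [pvB, hs]
    rw [pv_strip_id suffix hp1 hp2]
    simp only [er, hb4, hb5, Bool.false_eq_true, if_false]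

-- ===== VERDICT (by name: the statement is the Claim_ definition above) =====
theorem odoo_base_url2jsonrpc_endpoint_spec : Claim_equal_odoo_base_url2jsonrpc_endpoint := by
  intro u c _
  unfold Spec_odoo_base_url2jsonrpc_endpoint odoo_base_url2jsonrpc_endpoint odoo_base_url2jsonrpc_endpoint_alt
  rw [pvA_eq_pvB]
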